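-- pv_equiv track=rewrite | github.com/cuiwei0322/DataBasedWindDisasterIdentification | Program/extremewindspeed.py | year_sample
-- ===== SOURCE A (Python) =====
-- def year_sample(data):
--     result=[]
--     for i in range(len(data['spd'])):
--         if(i==0):
--             year=data['year'][i]
--             s=[]
--         elif( year!=data['year'][i]):
--             year=data['year'][i]
--             result.append(max(s))
--
--             s=[]
--         else:
--             s.append(data['spd'][i])
--
--     return result
-- ===== SOURCE B (Python) =====
-- def year_sample(data):
--     spd = data['spd']
--     if not spd:
--         return []
--     years = data['year']
--     result = []
--     best = None
--     for i in range(1, len(spd)):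
--         if years[i] != years[i - 1]:
--             result.append(best)
--             best = None
--         elif best is None or spd[i] > best:
--             best = spd[i]
--     return result
-- ===== Notes on version B (the rewrite author's own statement) =====
-- stated objective: alternative
-- what changed: B replaces A's carried year variable, per-group buffer list and max() call at each boundary with a single pass comparing adjacent years and keeping a running-max scalar (no sublists are ever built).
import Mathlib
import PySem

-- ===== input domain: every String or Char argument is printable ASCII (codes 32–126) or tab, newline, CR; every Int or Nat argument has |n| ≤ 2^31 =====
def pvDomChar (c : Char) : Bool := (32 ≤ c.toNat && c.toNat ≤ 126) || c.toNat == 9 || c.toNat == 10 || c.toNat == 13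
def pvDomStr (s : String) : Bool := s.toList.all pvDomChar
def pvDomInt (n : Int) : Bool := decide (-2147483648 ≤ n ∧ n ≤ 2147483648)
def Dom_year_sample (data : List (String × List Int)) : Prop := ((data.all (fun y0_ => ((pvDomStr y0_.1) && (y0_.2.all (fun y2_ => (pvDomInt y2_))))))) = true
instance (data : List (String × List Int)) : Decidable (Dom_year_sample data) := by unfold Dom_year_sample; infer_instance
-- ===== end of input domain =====

-- B replaces A's per-group buffer list + max() with a single pass keeping a running-max
-- scalar and comparing adjacent years; same O(n) cost, no sublists built (objective: alternative).


-- ===== PORT A =====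
-- loop body of A; state = (year, s, result).
-- `(PySem.List.max? … ).getD 0` / `pyGetD … 0`: Python raises ValueError / IndexError exactly
-- where the option is none / the index is out of range; those inputs are excluded by Pre_.
def stepA (ys spd : List Int) (st : Int × List Int × List Int) (i : Int) :
    Int × List Int × List Int :=
  if i == 0 then (PySem.List.pyGetD ys i 0, [], st.2.2)
  else if st.1 ≠ PySem.List.pyGetD ys i 0 then
    (PySem.List.pyGetD ys i 0, [],
      st.2.2 ++ [(PySem.List.max? st.2.1 (fun y => y)).getD 0])
  else (st.1, st.2.1 ++ [PySem.List.pyGetD spd i 0], st.2.2)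

def year_sample (data : List (String × List Int)) : List Int :=
  let d := PySem.Dict.ofList data
  let spd := d.getD "spd" []          -- data['spd']; KeyError (missing key) excluded by Pre_
  let ys := d.getD "year" []
  ((PySem.List.pyRange 0 (spd.length : Int) 1).foldl (stepA ys spd) (0, [], [])).2.2

-- ===== PORT B =====
-- loop body of B; state = (result, best). `best.getD 0`: on Pre_ best is always `some` at
-- an append (Python B would append None there, which Pre_ excludes).
def stepB (ys spd : List Int) (st : List Int × Option Int) (i : Int) :
    List Int × Option Int :=
  if PySem.List.pyGetD ys i 0 ≠ PySem.List.pyGetD ys (i - 1) 0 then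
    (st.1 ++ [st.2.getD 0], none)
  else
    match st.2 with
    | none => (st.1, some (PySem.List.pyGetD spd i 0))
    | some b =>
        if PySem.List.pyGetD spd i 0 > b then (st.1, some (PySem.List.pyGetD spd i 0))
        else (st.1, some b)

def year_sample_alt (data : List (String × List Int)) : List Int :=
  let d := PySem.Dict.ofList data
  let spd := d.getD "spd" []
  if spd = [] then []
  else
    let ys := d.getD "year" []
    ((PySem.List.pyRange 1 (spd.length : Int) 1).foldl (stepB ys spd) ([], none)).1

-- ===== PRECONDITION & SPEC =====
-- Pre_ = exactly the inputs on which Python A returns: the key 'spd' is present (else KeyError),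
-- and when spd is nonempty the 'year' list is long enough (else IndexError) and no run of equal
-- years other than the last has length 1 (else max([]) raises ValueError).
def Pre_year_sample (data : List (String × List Int)) : Prop :=
  (PySem.Dict.ofList data).contains "spd" = true ∧
  ((PySem.Dict.ofList data).getD "spd" [] ≠ [] →
    ((PySem.Dict.ofList data).getD "spd" []).length
        ≤ ((PySem.Dict.ofList data).getD "year" []).length ∧
    ∀ i ∈ List.range (((PySem.Dict.ofList data).getD "spd" []).length - 1),
      (i = 0 ∨ ((PySem.Dict.ofList data).getD "year" []).getD i 0
                ≠ ((PySem.Dict.ofList data).getD "year" []).getD (i - 1) 0) →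
      ((PySem.Dict.ofList data).getD "year" []).getD (i + 1) 0
        = ((PySem.Dict.ofList data).getD "year" []).getD i 0)
instance (data : List (String × List Int)) : Decidable (Pre_year_sample data) := by
  unfold Pre_year_sample; infer_instance

def pvWitness_year_sample : (List (String × List Int)) :=
  [("spd", [5, 3, 7, 2]), ("year", [1, 1, 2, 2])]

def Spec_year_sample (data : List (String × List Int)) (out : List Int) : Prop := out = year_sample_alt data
instance (data : List (String × List Int)) (out : List Int) : Decidable (Spec_year_sample data out) := by unfold Spec_year_sample; infer_instance

-- ===== CLAIM (what is proved, stated in full; the proofs are below) =====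
def Claim_equal_year_sample : Prop := ∀ (data : List (String × List Int)), Dom_year_sample data → Pre_year_sample data → Spec_year_sample data (year_sample data)

-- ===== LEMMAS AND PROOFS =====

-- running-max step of B applied to the max of s equals the max of s ++ [x]
lemma max?_append_singleton (s : List Int) (x : Int) :
    PySem.List.max? (s ++ [x]) (fun y => y)
      = some (match PySem.List.max? s (fun y => y) with
              | none => x
              | some b => if x > b then x else b) := by
  cases s with
  | nil =>
      have h0 : PySem.List.max? ([] : List Int) (fun y => y) = none := by
        simp [PySem.List.max?_eq_none_iff]
      simp [h0, PySem.List.max?_id_cons]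
  | cons a t =>
      have h1 : PySem.List.max? (a :: t) (fun y => y) = some (t.foldl max a) :=
        PySem.List.max?_id_cons a t
      have h2 : PySem.List.max? (a :: (t ++ [x])) (fun y => y)
          = some ((t ++ [x]).foldl max a) := PySem.List.max?_id_cons a (t ++ [x])
      have h3 : (t ++ [x]).foldl max a = max (t.foldl max a) x := by
        simp [List.foldl_append]
      have h4 : max (t.foldl max a) x = if x > t.foldl max a then x else t.foldl max a := by
        by_cases h : x > t.foldl max a
        · simp [max_eq_right h.le, h]
        · simp [max_eq_left (not_lt.mp h), h]
      simp only [List.cons_append, h2, h3, h4, h1]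

-- the two loops agree from index m ≥ 1 onward when the states are related:
-- A's year is the previous year, A's buffer max is B's running max, results coincide
lemma loop_agree (ys spd : List Int) :
    ∀ (t : Nat) (m : Int), 1 ≤ m → ((spd.length : Int) - m).toNat = t →
    ∀ (s res : List Int),
      ((PySem.List.pyRange m (spd.length : Int) 1).foldl (stepA ys spd)
          (PySem.List.pyGetD ys (m - 1) 0, s, res)).2.2
        = ((PySem.List.pyRange m (spd.length : Int) 1).foldl (stepB ys spd)
            (res, PySem.List.max? s (fun y => y))).1 := by
  intro t
  induction t with
  | zero =>
      intro m _ ht s res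
      have hnil : PySem.List.pyRange m (spd.length : Int) 1 = [] :=
        PySem.List.pyRange_one_eq_nil (by omega)
      simp [hnil]
  | succ t ih =>
      intro m hm ht s res
      have hlt : m < (spd.length : Int) := by omega
      rw [PySem.List.pyRange_one_cons hlt]
      simp only [List.foldl_cons]
      have hm0 : (m == 0) = false := by simp; omega
      have hm1 : m + 1 - 1 = m := by ring
      by_cases hch : PySem.List.pyGetD ys m 0 = PySem.List.pyGetD ys (m - 1) 0
      · -- same year: A buffers spd[m], B updates the running max
        have hA : stepA ys spd (PySem.List.pyGetD ys (m - 1) 0, s, res) m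
            = (PySem.List.pyGetD ys (m - 1) 0, s ++ [PySem.List.pyGetD spd m 0], res) := by
          simp [stepA, hm0, hch]
        have hB : stepB ys spd (res, PySem.List.max? s (fun y => y)) m
            = (res, PySem.List.max? (s ++ [PySem.List.pyGetD spd m 0]) (fun y => y)) := by
          rw [max?_append_singleton]
          cases hmx : PySem.List.max? s (fun y => y) with
          | none => simp [stepB, hch]
          | some b =>
              by_cases hgt : PySem.List.pyGetD spd m 0 > b <;>
                simp [stepB, hch, hgt]
        rw [hA, hB]
        have := ih (m + 1) (by omega) (by omega) (s ++ [PySem.List.pyGetD spd m 0]) res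
        rw [hm1] at this
        rw [hch] at this
        exact this
      · -- year change: both append the (same) group maximum and reset
        have hA : stepA ys spd (PySem.List.pyGetD ys (m - 1) 0, s, res) m
            = (PySem.List.pyGetD ys m 0, [],
               res ++ [(PySem.List.max? s (fun y => y)).getD 0]) := by
          have hne : PySem.List.pyGetD ys (m - 1) 0 ≠ PySem.List.pyGetD ys m 0 :=
            fun h => hch h.symm
          simp [stepA, hm0, hne]
        have hB : stepB ys spd (res, PySem.List.max? s (fun y => y)) m
            = (res ++ [(PySem.List.max? s (fun y => y)).getD 0], none) := by
          simp [stepB, hch]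
        rw [hA, hB]
        have h0 : PySem.List.max? ([] : List Int) (fun y => y) = none := by
          simp [PySem.List.max?_eq_none_iff]
        have := ih (m + 1) (by omega) (by omega) [] (res ++ [(PySem.List.max? s (fun y => y)).getD 0])
        rw [hm1, h0] at this
        exact this

-- the two whole programs, on arbitrary spd/year lists
lemma main_agree (spd ys : List Int) :
    ((PySem.List.pyRange 0 (spd.length : Int) 1).foldl (stepA ys spd) (0, [], [])).2.2
      = if spd = [] then []
        else ((PySem.List.pyRange 1 (spd.length : Int) 1).foldl (stepB ys spd) ([], none)).1 := by
  by_cases hnil : spd = []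
  · have h : PySem.List.pyRange 0 (spd.length : Int) 1 = [] := by
      rw [hnil]; exact PySem.List.pyRange_one_eq_nil (by simp)
    simp [hnil]
  · have hpos : 0 < (spd.length : Int) := by
      have := List.length_pos_iff.mpr hnil
      exact_mod_cast this
    rw [if_neg hnil, PySem.List.pyRange_one_cons hpos]
    simp only [List.foldl_cons]
    have hA0 : stepA ys spd (0, [], []) 0 = (PySem.List.pyGetD ys (1 - 1) 0, [], []) := by
      norm_num [stepA]
    have h0 : PySem.List.max? ([] : List Int) (fun y => y) = none := by
      simp [PySem.List.max?_eq_none_iff]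
    rw [hA0, ← h0]
    exact loop_agree ys spd ((spd.length : Int) - 1).toNat 1 (by omega) rfl [] []

-- ===== VERDICT (by name: the statement is the Claim_ definition above) =====
theorem year_sample_spec : Claim_equal_year_sample := by
  intro data _hdom _hpre
  unfold Spec_year_sample year_sample year_sample_alt
  exact main_agree ((PySem.Dict.ofList data).getD "spd" [])
    ((PySem.Dict.ofList data).getD "year" [])
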